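-- pv_equiv track=rewrite | github.com/lilaboc/leetcode | 3707.py | scoreBalance
-- ===== SOURCE A (Python) =====
-- def scoreBalance(s: str) -> bool:
--     n = len(s)
--     # Try all possible split points
--     for i in range(1, n):
--         left = s[:i]
--         right = s[i:]
--         left_score = sum(ord(c) - ord('a') + 1 for c in left)
--         right_score = sum(ord(c) - ord('a') + 1 for c in right)
--         if left_score == right_score:
--             return True
--     return False
-- ===== SOURCE B (Python) =====
-- def scoreBalance(s: str) -> bool:
--     # One pass: total score once, then a running prefix score; split is balanced
--     # iff twice the prefix equals the total.
--     total = sum(ord(c) - 96 for c in s)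
--     prefix = 0
--     for c in s[:-1]:
--         prefix += ord(c) - 96
--         if 2 * prefix == total:
--             return True
--     return False
-- ===== Notes on version B (the rewrite author's own statement) =====
-- stated objective: faster
-- what changed: Replaced the quadratic all-splits rescan (slicing and summing both halves at every split point) with a single pass that computes the total once and compares twice a running prefix sum against it.
import Mathlib
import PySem

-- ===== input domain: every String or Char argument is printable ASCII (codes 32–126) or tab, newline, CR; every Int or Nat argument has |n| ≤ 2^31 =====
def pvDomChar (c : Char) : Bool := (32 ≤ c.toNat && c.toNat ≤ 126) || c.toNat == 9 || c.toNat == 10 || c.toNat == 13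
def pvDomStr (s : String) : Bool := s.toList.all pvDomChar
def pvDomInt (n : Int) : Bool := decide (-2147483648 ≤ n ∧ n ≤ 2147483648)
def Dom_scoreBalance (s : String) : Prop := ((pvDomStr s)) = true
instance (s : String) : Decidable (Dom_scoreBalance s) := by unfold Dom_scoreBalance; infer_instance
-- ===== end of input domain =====

-- B replaces A's quadratic all-splits rescan with a single pass comparing twice a
-- running prefix score against the total score (objective: faster).

-- ===== PORT A =====
-- sum(ord(c) - ord('a') + 1 for c in part)
def pvScoreA (l : List Char) : Int :=
  l.foldl (fun a c => a + ((c.toNat : Int) - 97 + 1)) 0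

def scoreBalance (s : String) : Bool :=
  let n := PySem.Str.len s
  (PySem.List.pyRange 1 n 1).any (fun i =>
    let left := PySem.List.slice s.toList none (some i)
    let right := PySem.List.slice s.toList (some i) none
    pvScoreA left == pvScoreA right)

-- ===== PORT B =====
-- the 'for c in s[:-1]' loop with early return, carrying the running prefix
def pvBLoop (total : Int) : List Char → Int → Bool
  | [], _ => false
  | c :: rest, pref =>
      let p := pref + ((c.toNat : Int) - 96)
      if 2 * p == total then true else pvBLoop total rest p

def scoreBalance_alt (s : String) : Bool :=
  let total := s.toList.foldl (fun a c => a + ((c.toNat : Int) - 96)) 0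
  pvBLoop total s.toList.dropLast 0

-- ===== PRECONDITION & SPEC =====
def Spec_scoreBalance (s : String) (out : Bool) : Prop := out = scoreBalance_alt s
instance (s : String) (out : Bool) : Decidable (Spec_scoreBalance s out) := by unfold Spec_scoreBalance; infer_instance

-- ===== CLAIM (what is proved, stated in full; the proofs are below) =====
def Claim_equal_scoreBalance : Prop := ∀ (s : String), Dom_scoreBalance s → Spec_scoreBalance s (scoreBalance s)

-- ===== LEMMAS AND PROOFS =====

-- letter-score sum, the common mathematical object of both ports
def pvG (l : List Char) : Int := (l.map (fun c => (c.toNat : Int) - 96)).sum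

theorem pvG_append (a b : List Char) : pvG (a ++ b) = pvG a + pvG b := by
  simp [pvG]

theorem pvScoreA_eq (l : List Char) : pvScoreA l = pvG l := by
  have h : ∀ (l : List Char) (init : Int),
      l.foldl (fun a c => a + ((c.toNat : Int) - 97 + 1)) init = init + pvG l := by
    intro l
    induction l with
    | nil => intro init; simp [pvG]
    | cons c t ih =>
        intro init
        simp only [List.foldl_cons, ih, pvG, List.map_cons, List.sum_cons]
        ring
  simpa using h l 0

theorem pvTotal_eq (l : List Char) :
    l.foldl (fun a c => a + ((c.toNat : Int) - 96)) 0 = pvG l := by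
  have h : ∀ (l : List Char) (init : Int),
      l.foldl (fun a c => a + ((c.toNat : Int) - 96)) init = init + pvG l := by
    intro l
    induction l with
    | nil => intro init; simp [pvG]
    | cons c t ih =>
        intro init
        simp only [List.foldl_cons, ih, pvG, List.map_cons, List.sum_cons]
        ring
  simpa using h l 0

theorem pvG_take_add_drop (l : List Char) (j : Nat) :
    pvG (l.take j) + pvG (l.drop j) = pvG l := by
  rw [← pvG_append, List.take_append_drop]

theorem pvBLoop_iff (total : Int) (t : List Char) (pref : Int) :
    pvBLoop total t pref = true ↔
      ∃ k, k < t.length ∧ 2 * (pref + pvG (t.take (k + 1))) = total := by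
  induction t generalizing pref with
  | nil => simp [pvBLoop]
  | cons c rest ih =>
      simp only [pvBLoop, beq_iff_eq]
      split_ifs with h
      · constructor
        · intro _
          exact ⟨0, by simp, by simpa [pvG] using h⟩
        · intro _; rfl
      · rw [ih]
        constructor
        · rintro ⟨k, hk, hsum⟩
          refine ⟨k + 1, by simp only [List.length_cons]; omega, ?_⟩
          simp only [List.take_succ_cons, pvG, List.map_cons, List.sum_cons] at hsum ⊢
          omega
        · rintro ⟨k, hk, hsum⟩
          cases k with
          | zero =>
              exfalso; apply h
              simpa [pvG] using hsum
          | succ k' =>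
              refine ⟨k', by simp only [List.length_cons] at hk; omega, ?_⟩
              simp only [List.take_succ_cons, pvG, List.map_cons, List.sum_cons] at hsum ⊢
              omega

theorem pvA_iff (s : String) :
    scoreBalance s = true ↔
      ∃ j : Nat, 1 ≤ j ∧ j < s.toList.length ∧
        pvG (s.toList.take j) = pvG (s.toList.drop j) := by
  unfold scoreBalance
  simp only [List.any_eq_true, PySem.List.mem_pyRange_one, beq_iff_eq,
    pvScoreA_eq, PySem.Str.len_eq]
  constructor
  · rintro ⟨i, ⟨h1, h2⟩, heq⟩
    have h0 : (0 : Int) ≤ i := by omega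
    refine ⟨i.toNat, by omega, by omega, ?_⟩
    rwa [PySem.List.slice_to s.toList h0, PySem.List.slice_from s.toList h0] at heq
  · rintro ⟨j, h1, h2, heq⟩
    refine ⟨(j : Int), ⟨by exact_mod_cast h1, by exact_mod_cast h2⟩, ?_⟩
    rw [PySem.List.slice_to s.toList (by positivity), PySem.List.slice_from s.toList (by positivity)]
    simpa using heq

theorem pvB_iff (s : String) :
    scoreBalance_alt s = true ↔
      ∃ j : Nat, 1 ≤ j ∧ j < s.toList.length ∧
        2 * pvG (s.toList.take j) = pvG s.toList := by
  unfold scoreBalance_alt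
  rw [pvTotal_eq, pvBLoop_iff]
  constructor
  · rintro ⟨k, hk, hsum⟩
    have hlen : s.toList.dropLast.length = s.toList.length - 1 := by
      simp
    refine ⟨k + 1, by omega, by omega, ?_⟩
    rw [List.dropLast_eq_take, List.take_take] at hsum
    have hmin : min (k + 1) (s.toList.length - 1) = k + 1 := by omega
    rw [hmin] at hsum
    omega
  · rintro ⟨j, h1, h2, heq⟩
    refine ⟨j - 1, by rw [List.length_dropLast]; omega, ?_⟩
    rw [List.dropLast_eq_take, List.take_take]
    have hmin : min (j - 1 + 1) (s.toList.length - 1) = j := by omega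
    rw [hmin]
    omega

-- ===== VERDICT (by name: the statement is the Claim_ definition above) =====
theorem scoreBalance_spec : Claim_equal_scoreBalance := by
  intro s _
  show scoreBalance s = scoreBalance_alt s
  rw [Bool.eq_iff_iff, pvA_iff, pvB_iff]
  constructor <;> rintro ⟨j, h1, h2, heq⟩ <;>
    exact ⟨j, h1, h2, by have := pvG_take_add_drop s.toList j; omega⟩
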